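-- pv_equiv track=rewrite | github.com/Ivakhnenkoalex/middle | ft_oct_num.py | ft_bin_num
-- ===== SOURCE A (Python) =====
-- def ft_bin_num(a):
--     x = 1
--     d = 0
--     while a > 0:
--         d = d + a % 8 * x
--         x = x * 10
--         a = a // 8
--     return d
-- ===== SOURCE B (Python) =====
-- def ft_bin_num(a):
--     if a <= 0:
--         return 0
--     return ft_bin_num(a // 8) * 10 + a % 8
-- ===== Notes on version B (the rewrite author's own statement) =====
-- stated objective: simpler
-- what changed: Replaces the while loop with its accumulator and power-of-ten multiplier state by a direct recursion on the octal quotient that builds the decimal result most-significant-digit first with no auxiliary state.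
import Mathlib
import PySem

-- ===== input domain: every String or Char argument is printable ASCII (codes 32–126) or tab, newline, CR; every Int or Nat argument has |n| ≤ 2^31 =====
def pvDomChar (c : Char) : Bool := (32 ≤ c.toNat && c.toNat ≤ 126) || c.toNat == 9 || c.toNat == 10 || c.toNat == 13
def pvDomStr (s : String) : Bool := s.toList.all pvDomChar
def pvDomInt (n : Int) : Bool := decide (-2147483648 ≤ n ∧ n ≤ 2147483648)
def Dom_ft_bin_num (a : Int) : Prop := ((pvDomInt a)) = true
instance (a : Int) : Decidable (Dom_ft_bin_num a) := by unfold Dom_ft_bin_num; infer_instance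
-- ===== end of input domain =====

-- B replaces A's while loop with accumulator d and multiplier x by a direct
-- recursion building the decimal number most-significant-digit first (simpler).

-- ===== PORT A =====
-- A's while loop over state (a, x, d)
def ft_bin_num_loop (a x d : Int) : Int :=
  if a > 0 then
    ft_bin_num_loop (PySem.Int.floordiv a 8) (x * 10) (d + PySem.Int.mod a 8 * x)
  else d
termination_by a.toNat
decreasing_by
  rename_i h
  rw [PySem.Int.floordiv_eq_ediv_of_pos (by norm_num)]
  omega

def ft_bin_num (a : Int) : Int := ft_bin_num_loop a 1 0

-- ===== PORT B =====
def ft_bin_num_alt (a : Int) : Int :=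
  if a ≤ 0 then 0
  else ft_bin_num_alt (PySem.Int.floordiv a 8) * 10 + PySem.Int.mod a 8
termination_by a.toNat
decreasing_by
  rename_i h
  rw [PySem.Int.floordiv_eq_ediv_of_pos (by norm_num)]
  omega

-- ===== PRECONDITION & SPEC =====
def Spec_ft_bin_num (a : Int) (out : Int) : Prop := out = ft_bin_num_alt a
instance (a : Int) (out : Int) : Decidable (Spec_ft_bin_num a out) := by unfold Spec_ft_bin_num; infer_instance

-- ===== CLAIM (what is proved, stated in full; the proofs are below) =====
def Claim_equal_ft_bin_num : Prop := ∀ (a : Int), Dom_ft_bin_num a → Spec_ft_bin_num a (ft_bin_num a)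

-- ===== LEMMAS AND PROOFS =====
theorem ft_bin_num_loop_eq (a x d : Int) :
    ft_bin_num_loop a x d = d + x * ft_bin_num_alt a := by
  induction a, x, d using ft_bin_num_loop.induct with
  | case1 a x d h ih =>
    have halt : ft_bin_num_alt a
        = ft_bin_num_alt (PySem.Int.floordiv a 8) * 10 + PySem.Int.mod a 8 := by
      rw [ft_bin_num_alt]
      exact if_neg (by omega)
    rw [ft_bin_num_loop, if_pos h, ih, halt]
    ring
  | case2 a x d h =>
    have halt : ft_bin_num_alt a = 0 := by
      rw [ft_bin_num_alt]
      exact if_pos (by omega)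
    rw [ft_bin_num_loop, if_neg h, halt]
    ring

-- ===== VERDICT (by name: the statement is the Claim_ definition above) =====
theorem ft_bin_num_spec : Claim_equal_ft_bin_num := by
  intro a _
  show ft_bin_num a = ft_bin_num_alt a
  rw [ft_bin_num, ft_bin_num_loop_eq]
  ring
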